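-- pv_equiv track=rewrite | github.com/jono8001/daydine | restaurant_operator_intelligence.py | _find_venue
-- ===== SOURCE A (Python) =====
-- def _find_venue(data, name):
--     """Find a venue by name (case-insensitive partial match)."""
--     name_lower = name.lower()
--     for key, rec in data.items():
--         if rec.get("n", "").lower() == name_lower:
--             return key, rec
--     # Partial match
--     for key, rec in data.items():
--         if name_lower in rec.get("n", "").lower():
--             return key, rec
--     return None, None
-- ===== SOURCE B (Python) =====
-- def _find_venue(data, name):
--     """Find a venue by name: single pass, exact match wins, first partial kept as fallback."""
--     name_lower = name.lower()
--     partial = None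
--     for key, rec in data.items():
--         n = rec.get("n", "").lower()
--         if n == name_lower:
--             return key, rec
--         if partial is None and name_lower in n:
--             partial = (key, rec)
--     if partial is not None:
--         return partial
--     return None, None
-- ===== Notes on version B (the rewrite author's own statement) =====
-- stated objective: alternative
-- what changed: Replaces A's two full passes over data (exact pass then partial pass) by a single pass that returns on an exact match and carries the first partial match as an accumulator.
import Mathlib
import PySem

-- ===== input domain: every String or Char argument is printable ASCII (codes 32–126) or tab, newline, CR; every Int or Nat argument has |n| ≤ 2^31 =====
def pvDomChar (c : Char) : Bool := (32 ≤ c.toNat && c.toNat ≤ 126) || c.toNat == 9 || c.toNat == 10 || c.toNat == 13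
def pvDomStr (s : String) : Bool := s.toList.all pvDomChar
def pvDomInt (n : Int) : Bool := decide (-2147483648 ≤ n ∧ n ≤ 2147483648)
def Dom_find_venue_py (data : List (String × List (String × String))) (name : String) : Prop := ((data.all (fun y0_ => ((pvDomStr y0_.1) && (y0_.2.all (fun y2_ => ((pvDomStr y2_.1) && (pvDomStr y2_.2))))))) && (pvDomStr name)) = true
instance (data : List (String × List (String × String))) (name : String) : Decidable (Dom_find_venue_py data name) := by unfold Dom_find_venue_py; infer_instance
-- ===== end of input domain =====

-- B makes one pass (exact match returns at once, first partial match carried as an accumulator)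
-- instead of A's two full passes; return-value equivalence proved on the stated domain.

-- ===== PORT A =====
-- first loop of A: first record whose lowered "n" equals name_lower
def fvExact (nl : String) : List (String × List (String × String)) → Option (String × List (String × String))
  | [] => none
  | (k, r) :: rest =>
    if PySem.Str.lower (PySem.Dict.getD (PySem.Dict.mk r) "n" "") == nl then some (k, r)
    else fvExact nl rest

-- second loop of A: first record whose lowered "n" contains name_lower
def fvPartial (nl : String) : List (String × List (String × String)) → Option (String × List (String × String))
  | [] => none
  | (k, r) :: rest =>
    if PySem.Str.isIn nl (PySem.Str.lower (PySem.Dict.getD (PySem.Dict.mk r) "n" "")) then some (k, r)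
    else fvPartial nl rest

def find_venue_py (data : List (String × List (String × String))) (name : String) : Option String × (Option (List (String × String))) :=
  let nl := PySem.Str.lower name
  match fvExact nl data with
  | some (k, r) => (some k, some r)
  | none =>
    match fvPartial nl data with
    | some (k, r) => (some k, some r)
    | none => (none, none)

-- ===== PORT B =====
-- single pass; `part` is the first partial match seen so far (None initially)
def fvGo (nl : String) : List (String × List (String × String)) → Option (String × List (String × String)) → Option String × (Option (List (String × String)))
  | [], part =>
    match part with
    | some (k, r) => (some k, some r)
    | none => (none, none)
  | (k, r) :: rest, part =>
    let n := PySem.Str.lower (PySem.Dict.getD (PySem.Dict.mk r) "n" "")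
    if n == nl then (some k, some r)
    else if part.isNone && PySem.Str.isIn nl n then fvGo nl rest (some (k, r))
    else fvGo nl rest part

def find_venue_py_alt (data : List (String × List (String × String))) (name : String) : Option String × (Option (List (String × String))) :=
  fvGo (PySem.Str.lower name) data none

-- ===== PRECONDITION & SPEC =====
def Spec_find_venue_py (data : List (String × List (String × String))) (name : String) (out : Option String × (Option (List (String × String)))) : Prop := out = find_venue_py_alt data name
instance (data : List (String × List (String × String))) (name : String) (out : Option String × (Option (List (String × String)))) : Decidable (Spec_find_venue_py data name out) := by unfold Spec_find_venue_py; infer_instance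

-- ===== CLAIM (what is proved, stated in full; the proofs are below) =====
def Claim_equal_find_venue_py : Prop := ∀ (data : List (String × List (String × String))) (name : String), Dom_find_venue_py data name → Spec_find_venue_py data name (find_venue_py data name)

-- ===== LEMMAS AND PROOFS =====
-- loop invariant: the one-pass fold with accumulator `part` equals A's two-pass result
theorem fvGo_eq (nl : String) (l : List (String × List (String × String)))
    (part : Option (String × List (String × String))) :
    fvGo nl l part =
      match fvExact nl l with
      | some (k, r) => (some k, some r)
      | none =>
        match part with
        | some (k, r) => (some k, some r)
        | none =>
          match fvPartial nl l with
          | some (k, r) => (some k, some r)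
          | none => (none, none) := by
  induction l generalizing part with
  | nil => cases part <;> simp [fvGo, fvExact, fvPartial]
  | cons hd rest ih =>
    obtain ⟨k, r⟩ := hd
    by_cases he : (PySem.Str.lower (PySem.Dict.getD (PySem.Dict.mk r) "n" "") == nl) = true
    · simp [fvGo, fvExact, he]
    · by_cases hp : (PySem.Str.isIn nl (PySem.Str.lower (PySem.Dict.getD (PySem.Dict.mk r) "n" ""))) = true
      · cases part with
        | none =>
          simp only [PySem.Str.isIn_eq, PySem.Str.toList_lower] at hp
          simp [fvGo, fvExact, fvPartial, he, hp, ih]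
        | some p =>
          simp [fvGo, fvExact, fvPartial, he, hp, ih]
      · cases part with
        | none =>
          simp only [PySem.Str.isIn_eq, PySem.Str.toList_lower] at hp
          simp [fvGo, fvExact, fvPartial, he, hp, ih]
        | some p =>
          simp [fvGo, fvExact, fvPartial, he, hp, ih]

-- ===== VERDICT (by name: the statement is the Claim_ definition above) =====
theorem find_venue_py_spec : Claim_equal_find_venue_py := by
  intro data name _
  unfold Spec_find_venue_py find_venue_py find_venue_py_alt
  rw [fvGo_eq]
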